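-- pv_equiv track=rewrite | github.com/aqsunqar2215/smart-city-almaty | backend/local_retriever.py | _infer_query_domain
-- ===== SOURCE A (Python) =====
-- from typing import Dict, List, Set, Tuple
--
-- def _infer_query_domain(q_tokens: Set[str]) -> str:
--     domain_keywords: Dict[str, Set[str]] = {
--         "transport": {"bus", "metro", "route", "traffic", "road", "airport", "taxi"},
--         "weather": {"weather", "forecast", "temperature", "aqi", "air", "pollution", "smog", "pm25"},
--         "emergency": {"emergency", "ambulance", "police", "fire", "accident", "101", "102", "103", "112"},
--         "city": {"almaty", "district", "park", "museum", "history", "service", "city"},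
--     }
--     best_domain = ""
--     best_overlap = 0
--     for domain, words in domain_keywords.items():
--         overlap = len(q_tokens.intersection(words))
--         if overlap > best_overlap:
--             best_overlap = overlap
--             best_domain = domain
--     return best_domain
-- ===== SOURCE B (Python) =====
-- # B: inverted keyword->domain dict + per-domain voting, then a strict-'>' scan over the fixed domain order.
-- _KEYWORD_DOMAIN = {
--     "bus": "transport", "metro": "transport", "route": "transport", "traffic": "transport",
--     "road": "transport", "airport": "transport", "taxi": "transport",
--     "weather": "weather", "forecast": "weather", "temperature": "weather", "aqi": "weather",
--     "air": "weather", "pollution": "weather", "smog": "weather", "pm25": "weather",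
--     "emergency": "emergency", "ambulance": "emergency", "police": "emergency", "fire": "emergency",
--     "accident": "emergency", "101": "emergency", "102": "emergency", "103": "emergency", "112": "emergency",
--     "almaty": "city", "district": "city", "park": "city", "museum": "city",
--     "history": "city", "service": "city", "city": "city",
-- }
-- _DOMAINS = ("transport", "weather", "emergency", "city")
--
-- def _infer_query_domain(q_tokens):
--     hits = [_KEYWORD_DOMAIN[tok] for tok in q_tokens if tok in _KEYWORD_DOMAIN]
--     votes = {}
--     for d in hits:
--         votes[d] = votes.get(d, 0) + 1
--     best_domain = ""
--     best = 0
--     for d in _DOMAINS: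
--         v = votes.get(d, 0)
--         if v > best:
--             best = v
--             best_domain = d
--     return best_domain
-- ===== Notes on version B (the rewrite author's own statement) =====
-- stated objective: alternative
-- what changed: Replaces per-domain set intersections with an inverted keyword-to-domain dict: tokens vote once each via a single lookup pass, and the winner is picked by a strict-'>' scan over the fixed domain order.
import Mathlib
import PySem

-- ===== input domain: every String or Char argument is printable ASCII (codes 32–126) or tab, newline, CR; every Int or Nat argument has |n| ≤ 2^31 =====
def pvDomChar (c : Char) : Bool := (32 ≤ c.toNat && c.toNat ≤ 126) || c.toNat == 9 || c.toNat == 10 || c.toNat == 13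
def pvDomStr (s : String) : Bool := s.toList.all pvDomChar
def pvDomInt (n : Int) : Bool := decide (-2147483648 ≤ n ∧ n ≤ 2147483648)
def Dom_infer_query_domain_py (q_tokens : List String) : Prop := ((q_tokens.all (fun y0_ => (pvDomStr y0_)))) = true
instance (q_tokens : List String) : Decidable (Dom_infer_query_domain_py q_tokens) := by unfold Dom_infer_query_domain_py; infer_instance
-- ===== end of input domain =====

-- B replaces per-domain set intersections by an inverted keyword→domain dict with one voting pass
-- over the tokens, then a strict-'>' scan over the fixed domain order (an alternative algorithm).

-- ===== PORT A =====
-- the dict literal of A, in insertion order; each keyword set as its (duplicate-free) literal list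
def domainKeywordsA : List (String × List String) :=
  [("transport", ["bus", "metro", "route", "traffic", "road", "airport", "taxi"]),
   ("weather", ["weather", "forecast", "temperature", "aqi", "air", "pollution", "smog", "pm25"]),
   ("emergency", ["emergency", "ambulance", "police", "fire", "accident", "101", "102", "103", "112"]),
   ("city", ["almaty", "district", "park", "museum", "history", "service", "city"])]

def infer_query_domain_py (q_tokens : List String) : String :=
  let s : PySem.Set String := PySem.Set.ofList q_tokens
  (domainKeywordsA.foldl (fun (acc : String × Int) dw =>
      let overlap : Int := PySem.Set.len (PySem.Set.inter s dw.2)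
      if overlap > acc.2 then (dw.1, overlap) else acc) ("", 0)).1

-- ===== PORT B =====
def kwDomainB : PySem.Dict String String :=
  ⟨[("bus", "transport"), ("metro", "transport"), ("route", "transport"), ("traffic", "transport"),
    ("road", "transport"), ("airport", "transport"), ("taxi", "transport"),
    ("weather", "weather"), ("forecast", "weather"), ("temperature", "weather"), ("aqi", "weather"),
    ("air", "weather"), ("pollution", "weather"), ("smog", "weather"), ("pm25", "weather"),
    ("emergency", "emergency"), ("ambulance", "emergency"), ("police", "emergency"), ("fire", "emergency"),
    ("accident", "emergency"), ("101", "emergency"), ("102", "emergency"), ("103", "emergency"), ("112", "emergency"),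
    ("almaty", "city"), ("district", "city"), ("park", "city"), ("museum", "city"),
    ("history", "city"), ("service", "city"), ("city", "city")]⟩

def domainsB : List String := ["transport", "weather", "emergency", "city"]

def infer_query_domain_py_alt (q_tokens : List String) : String :=
  let s : PySem.Set String := PySem.Set.ofList q_tokens
  let hits : List String := s.filterMap (fun t => PySem.Dict.get? kwDomainB t)
  let votes : PySem.Dict String Int :=
    hits.foldl (fun d x => d.insert x (d.getD x 0 + 1)) PySem.Dict.empty
  (domainsB.foldl (fun (acc : String × Int) d =>
      let v : Int := votes.getD d 0
      if v > acc.2 then (d, v) else acc) ("", 0)).1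

-- ===== PRECONDITION & SPEC =====
def Spec_infer_query_domain_py (q_tokens : List String) (out : String) : Prop := out = infer_query_domain_py_alt q_tokens
instance (q_tokens : List String) (out : String) : Decidable (Spec_infer_query_domain_py q_tokens out) := by unfold Spec_infer_query_domain_py; infer_instance

-- ===== CLAIM (what is proved, stated in full; the proofs are below) =====
def Claim_equal_infer_query_domain_py : Prop := ∀ (q_tokens : List String), Dom_infer_query_domain_py q_tokens → Spec_infer_query_domain_py q_tokens (infer_query_domain_py q_tokens)

-- ===== LEMMAS AND PROOFS =====

-- counting a value in a filterMap = counting preimages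
theorem count_filterMap_eq_countP {α β : Type} [DecidableEq β] (f : α → Option β) (d : β) :
    ∀ (l : List α), (l.filterMap f).count d = l.countP (fun x => f x == some d) := by
  intro l
  induction l with
  | nil => rfl
  | cons x xs ih =>
    simp only [List.filterMap_cons, List.countP_cons]
    cases h : f x with
    | none => simp [ih]
    | some b =>
      by_cases hb : b = d <;> simp [hb, ih]

-- classification of the inverted dict, one lemma per domain
theorem kwDomainB_keys_nodup : kwDomainB.keys.Nodup := by decide

set_option maxRecDepth 4096 in
theorem classify_transport (t : String) :
    (PySem.Dict.get? kwDomainB t == some "transport") =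
      (["bus", "metro", "route", "traffic", "road", "airport", "taxi"] : List String).contains t := by
  rw [Bool.eq_iff_iff, beq_iff_eq,
    PySem.Dict.get?_eq_some_iff_mem_items kwDomainB t "transport" kwDomainB_keys_nodup,
    List.contains_iff_mem]
  have hi : kwDomainB.items = kwDomainB.1 := rfl
  rw [hi]
  simp only [kwDomainB, List.mem_cons, List.not_mem_nil, Prod.mk.injEq, or_false]
  simp

set_option maxRecDepth 4096 in
theorem classify_weather (t : String) :
    (PySem.Dict.get? kwDomainB t == some "weather") =
      (["weather", "forecast", "temperature", "aqi", "air", "pollution", "smog", "pm25"] : List String).contains t := by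
  rw [Bool.eq_iff_iff, beq_iff_eq,
    PySem.Dict.get?_eq_some_iff_mem_items kwDomainB t "weather" kwDomainB_keys_nodup,
    List.contains_iff_mem]
  have hi : kwDomainB.items = kwDomainB.1 := rfl
  rw [hi]
  simp only [kwDomainB, List.mem_cons, List.not_mem_nil, Prod.mk.injEq, or_false]
  simp

set_option maxRecDepth 4096 in
theorem classify_emergency (t : String) :
    (PySem.Dict.get? kwDomainB t == some "emergency") =
      (["emergency", "ambulance", "police", "fire", "accident", "101", "102", "103", "112"] : List String).contains t := by
  rw [Bool.eq_iff_iff, beq_iff_eq,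
    PySem.Dict.get?_eq_some_iff_mem_items kwDomainB t "emergency" kwDomainB_keys_nodup,
    List.contains_iff_mem]
  have hi : kwDomainB.items = kwDomainB.1 := rfl
  rw [hi]
  simp only [kwDomainB, List.mem_cons, List.not_mem_nil, Prod.mk.injEq, or_false]
  simp

set_option maxRecDepth 4096 in
theorem classify_city (t : String) :
    (PySem.Dict.get? kwDomainB t == some "city") =
      (["almaty", "district", "park", "museum", "history", "service", "city"] : List String).contains t := by
  rw [Bool.eq_iff_iff, beq_iff_eq,
    PySem.Dict.get?_eq_some_iff_mem_items kwDomainB t "city" kwDomainB_keys_nodup,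
    List.contains_iff_mem]
  have hi : kwDomainB.items = kwDomainB.1 := rfl
  rw [hi]
  simp only [kwDomainB, List.mem_cons, List.not_mem_nil, Prod.mk.injEq, or_false]
  simp

-- overlap of A = vote count of B, for a domain whose keywords the inverted dict classifies
theorem overlap_eq_count (s : List String) (D : String) (w : List String)
    (h : ∀ t, (PySem.Dict.get? kwDomainB t == some D) = w.contains t) :
    PySem.Set.len (PySem.Set.inter s w) =
      ((s.filterMap (fun t => PySem.Dict.get? kwDomainB t)).count D : Int) := by
  have : PySem.Set.inter s w = s.filter (fun x => w.contains x) := rfl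
  rw [PySem.Set.len, this, count_filterMap_eq_countP, ← List.countP_eq_length_filter]
  congr 2
  funext t
  rw [h t]

-- ===== VERDICT (by name: the statement is the Claim_ definition above) =====
theorem infer_query_domain_py_spec : Claim_equal_infer_query_domain_py := by
  intro q _
  show infer_query_domain_py q = infer_query_domain_py_alt q
  simp only [infer_query_domain_py, infer_query_domain_py_alt, domainKeywordsA, domainsB,
    List.foldl]
  rw [overlap_eq_count _ _ _ classify_transport, overlap_eq_count _ _ _ classify_weather,
    overlap_eq_count _ _ _ classify_emergency, overlap_eq_count _ _ _ classify_city]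
  simp only [PySem.Dict.getD_foldl_insert_add_one, PySem.Dict.getD_empty, zero_add]
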